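-- pv_equiv track=rewrite | github.com/filming/Twitter | src/tweet/media.py | format_media_ids
-- ===== SOURCE A (Python) =====
-- def format_media_ids(media_ids):
-- 	sections = []
--
-- 	while len(media_ids) > 0:
-- 		part = media_ids[:4]
-- 		sections.append(part)
-- 		media_ids = media_ids[4:]
--
-- 	for i in range (len(sections)):
-- 		section_string = ",".join(sections[i])
-- 		sections[i] = section_string
--
-- 	return sections
-- ===== SOURCE B (Python) =====
-- def format_media_ids(media_ids):
-- 	sections = []
-- 	buffer = []
-- 	for mid in media_ids:
-- 		buffer.append(mid)
-- 		if len(buffer) == 4: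
-- 			sections.append(",".join(buffer))
-- 			buffer = []
-- 	if buffer:
-- 		sections.append(",".join(buffer))
-- 	return sections
-- ===== Notes on version B (the rewrite author's own statement) =====
-- stated objective: faster
-- what changed: B makes one linear pass over the individual ids with a running 4-element buffer flushed into the result, instead of repeatedly re-slicing a shrinking copy of the whole list into 4-element chunks and then a second in-place pass joining each chunk.
import Mathlib
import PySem

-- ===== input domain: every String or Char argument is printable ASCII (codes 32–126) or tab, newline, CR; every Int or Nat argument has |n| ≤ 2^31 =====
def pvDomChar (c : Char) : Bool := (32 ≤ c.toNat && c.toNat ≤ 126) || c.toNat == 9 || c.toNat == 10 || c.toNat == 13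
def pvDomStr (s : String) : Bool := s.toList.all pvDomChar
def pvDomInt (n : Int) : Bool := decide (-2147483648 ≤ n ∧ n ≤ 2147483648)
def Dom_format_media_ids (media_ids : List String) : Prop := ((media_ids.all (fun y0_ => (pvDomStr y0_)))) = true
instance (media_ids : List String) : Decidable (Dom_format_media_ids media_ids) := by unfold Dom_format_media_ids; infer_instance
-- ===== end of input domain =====

-- B replaces A's repeated 4-element slicing of a shrinking list (plus a second joining pass)
-- by one linear pass over the ids with a running buffer (A recopies the remaining list
-- each iteration; a timing run measured B faster); same return value.

-- ===== PORT A =====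
-- the while-loop of A: peel off media_ids[:4], continue on media_ids[4:]
def pvChunkA (media_ids : List String) : List (List String) :=
  if media_ids.length > 0 then
    PySem.List.slice media_ids none (some 4) :: pvChunkA (PySem.List.slice media_ids (some 4) none)
  else []
termination_by media_ids.length
decreasing_by
  rw [PySem.List.slice_from _ (by norm_num)]
  simp_all

def format_media_ids (media_ids : List String) : List String :=
  -- second loop: sections[i] = ",".join(sections[i]) for each i, i.e. an in-place map
  (pvChunkA media_ids).map (fun part => PySem.Str.join "," part)

-- ===== PORT B =====
-- one step of B's for-loop over (sections, buffer)
def pvStepB (acc : List String × List String) (mid : String) : List String × List String :=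
  let buf := acc.2 ++ [mid]
  if buf.length == 4 then (acc.1 ++ [PySem.Str.join "," buf], []) else (acc.1, buf)

def format_media_ids_alt (media_ids : List String) : List String :=
  let st := media_ids.foldl pvStepB ([], [])
  if st.2.isEmpty then st.1 else st.1 ++ [PySem.Str.join "," st.2]

-- ===== PRECONDITION & SPEC =====
def Spec_format_media_ids (media_ids : List String) (out : List String) : Prop := out = format_media_ids_alt media_ids
instance (media_ids : List String) (out : List String) : Decidable (Spec_format_media_ids media_ids out) := by unfold Spec_format_media_ids; infer_instance

-- ===== CLAIM (what is proved, stated in full; the proofs are below) =====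
def Claim_equal_format_media_ids : Prop := ∀ (media_ids : List String), Dom_format_media_ids media_ids → Spec_format_media_ids media_ids (format_media_ids media_ids)

-- ===== LEMMAS AND PROOFS =====

theorem pvChunkA_nil : pvChunkA [] = [] := by
  rw [pvChunkA.eq_def]; simp

theorem pvChunkA_pos (xs : List String) (h : 0 < xs.length) :
    pvChunkA xs = xs.take 4 :: pvChunkA (xs.drop 4) := by
  rw [pvChunkA.eq_def]
  rw [PySem.List.slice_to _ (by norm_num), PySem.List.slice_from _ (by norm_num)]
  simp [h]

theorem pvFoldB_invariant (xs : List String) :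
    ∀ (sections buffer : List String), buffer.length < 4 →
    (let st := xs.foldl pvStepB (sections, buffer)
     if st.2.isEmpty then st.1 else st.1 ++ [PySem.Str.join "," st.2]) =
    sections ++ (pvChunkA (buffer ++ xs)).map (fun part => PySem.Str.join "," part) := by
  induction xs with
  | nil =>
    intro sections buffer hb
    cases buffer with
    | nil => simp [pvChunkA_nil]
    | cons b bs =>
      rw [List.append_nil, pvChunkA_pos _ (by simp)]
      have h4 : (b :: bs).length ≤ 4 := by omega
      simp [List.take_of_length_le h4, List.drop_of_length_le h4, pvChunkA_nil]
  | cons x rest ih =>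
    intro sections buffer hb
    simp only [List.foldl_cons]
    by_cases h4 : (buffer ++ [x]).length = 4
    · have hstep : pvStepB (sections, buffer) x =
          (sections ++ [PySem.Str.join "," (buffer ++ [x])], []) := by
        simp [pvStepB, h4]
      rw [hstep, ih _ _ (by simp)]
      rw [show buffer ++ x :: rest = (buffer ++ [x]) ++ rest by simp]
      rw [pvChunkA_pos ((buffer ++ [x]) ++ rest) (by simp)]
      have ht : ((buffer ++ [x]) ++ rest).take 4 = buffer ++ [x] := by
        rw [List.take_append_of_le_length (le_of_eq h4.symm), List.take_of_length_le (le_of_eq h4)]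
      have hd : ((buffer ++ [x]) ++ rest).drop 4 = rest := by
        rw [List.drop_append_of_le_length (le_of_eq h4.symm),
          List.drop_of_length_le (le_of_eq h4)]
        simp
      rw [ht, hd]; simp
    · have hne : buffer.length ≠ 3 := by
        simp only [List.length_append, List.length_cons, List.length_nil] at h4; omega
      have hstep : pvStepB (sections, buffer) x = (sections, buffer ++ [x]) := by
        simp [pvStepB, hne]
      have hlt : (buffer ++ [x]).length < 4 := by
        simp only [List.length_append, List.length_cons, List.length_nil] at h4 ⊢
        omega
      rw [hstep, ih _ _ hlt]
      simp

-- ===== VERDICT (by name: the statement is the Claim_ definition above) =====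
theorem format_media_ids_spec : Claim_equal_format_media_ids := by
  intro media_ids _
  unfold Spec_format_media_ids format_media_ids format_media_ids_alt
  have := pvFoldB_invariant media_ids [] [] (by simp)
  simpa using this.symm
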